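-- pv_equiv track=rewrite | github.com/windprince/autoanalyzer | NotebookAnalyzer.py | _determine_workflow_sequence
-- ===== SOURCE A (Python) =====
-- from typing import Dict, List, Any, Optional, Set, Tuple
--
-- def _determine_workflow_sequence(
--                                 preprocessing: List[str],
--                                 analysis: List[str],
--                                 visualization: List[str]) -> List[str]:
--     """Create a simplified workflow sequence"""
--     workflow = []
--
--     # Add preprocessing steps
--     if preprocessing:
--         workflow.append("data_preparation")
--
--         # Add specific preprocessing categories
--         for step in preprocessing:
--             category = step.split('_')[0]  # e.g., 'missing' from 'missing_value_handling'
--             if category and f"{category}_processing" not in workflow: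
--                 workflow.append(f"{category}_processing")
--
--     # Add exploratory analysis if visualization comes before modeling
--     if visualization:
--         workflow.append("exploratory_analysis")
--
--     # Add modeling steps
--     modeling_techniques = [
--         "regression_analysis",
--         "classification_analysis",
--         "clustering_analysis",
--         "dimensionality_reduction",
--         "time_series_analysis"
--     ]
--
--     for technique in analysis:
--         if technique in modeling_techniques:
--             workflow.append("modeling")
--             break
--
--     # Add specific analysis types
--     for technique in analysis:
--         if technique not in workflow:
--             workflow.append(technique)
--
--     # Add visualization if it wasn't added earlier
--     if visualization and "exploratory_analysis" not in workflow:
--         workflow.append("results_visualization")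
--
--     return workflow
-- ===== SOURCE B (Python) =====
-- def _determine_workflow_sequence(preprocessing, analysis, visualization):
--     """Create a simplified workflow sequence (guard-free build + one dedup pass)."""
--     raw = []
--     if preprocessing:
--         raw.append("data_preparation")
--         raw += [f"{s.split('_')[0]}_processing" for s in preprocessing if s.split('_')[0]]
--     if visualization:
--         raw.append("exploratory_analysis")
--     modeling_techniques = {
--         "regression_analysis",
--         "classification_analysis",
--         "clustering_analysis",
--         "dimensionality_reduction",
--         "time_series_analysis",
--     }
--     if any(t in modeling_techniques for t in analysis):
--         raw.append("modeling")
--     raw += analysis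
--     seen = set()
--     workflow = []
--     for x in raw:
--         if x not in seen:
--             seen.add(x)
--             workflow.append(x)
--     return workflow
-- ===== Notes on version B (the rewrite author's own statement) =====
-- stated objective: faster
-- what changed: B builds the raw candidate list with no inline 'not in workflow' guards (data_preparation, all category strings, exploratory_analysis, a single 'modeling' found via any(), then all analysis techniques), drops the dead results_visualization branch, and returns one order-preserving first-occurrence dedup pass over that list using a hash seen-set, removing A's repeated linear list-membership scans.
import Mathlib
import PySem

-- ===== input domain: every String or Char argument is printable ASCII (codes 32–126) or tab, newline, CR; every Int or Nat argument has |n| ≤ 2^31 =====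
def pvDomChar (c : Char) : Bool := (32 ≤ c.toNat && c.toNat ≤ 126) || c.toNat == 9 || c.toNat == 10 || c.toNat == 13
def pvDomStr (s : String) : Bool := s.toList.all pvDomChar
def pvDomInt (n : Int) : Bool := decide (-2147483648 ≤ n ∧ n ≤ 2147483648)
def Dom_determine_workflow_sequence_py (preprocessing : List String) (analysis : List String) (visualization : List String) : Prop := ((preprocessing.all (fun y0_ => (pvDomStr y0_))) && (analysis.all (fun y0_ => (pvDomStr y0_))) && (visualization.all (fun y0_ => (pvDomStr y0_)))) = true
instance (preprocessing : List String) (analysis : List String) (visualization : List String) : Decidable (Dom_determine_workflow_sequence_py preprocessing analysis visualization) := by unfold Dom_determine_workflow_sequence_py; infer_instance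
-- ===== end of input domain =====

-- B builds the raw candidate list with no inline membership guards (and drops the dead
-- 'results_visualization' branch) and returns a single order-preserving first-occurrence dedup
-- pass with a hash seen-set, replacing A's repeated linear 'not in workflow' list scans (measured faster).

-- ===== PORT A =====
-- modeling_techniques (same literal list in both Pythons)
def pvModelingTechniques : List String :=
  ["regression_analysis", "classification_analysis", "clustering_analysis",
   "dimensionality_reduction", "time_series_analysis"]

-- step.split('_')[0]; Python split with a nonempty separator never returns none and always
-- returns a nonempty list, so getD []/headD "" never supply their defaults and this is exact.
def pvCatStr (step : String) : String := ((PySem.Str.split? step "_").getD []).headD ""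

-- the 'for technique in analysis: … break' loop of A, literally
def pvBreakLoop (w : List String) : List String → List String
  | [] => w
  | t :: ts => if t ∈ pvModelingTechniques then w ++ ["modeling"] else pvBreakLoop w ts

def determine_workflow_sequence_py (preprocessing : List String) (analysis : List String) (visualization : List String) : List String :=
  let w : List String := []
  let w := if preprocessing ≠ [] then
      preprocessing.foldl (fun w step =>
        let category := pvCatStr step
        if category ≠ "" ∧ (category ++ "_processing") ∉ w then w ++ [category ++ "_processing"] else w)
        (w ++ ["data_preparation"])
    else w
  let w := if visualization ≠ [] then w ++ ["exploratory_analysis"] else w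
  let w := pvBreakLoop w analysis
  let w := analysis.foldl (fun w t => if t ∉ w then w ++ [t] else w) w
  if visualization ≠ [] ∧ "exploratory_analysis" ∉ w then w ++ ["results_visualization"] else w

-- ===== PORT B =====
-- the raw candidate list, built with no membership guards
def pvRaw (preprocessing : List String) (analysis : List String) (visualization : List String) : List String :=
  (if preprocessing ≠ [] then
      "data_preparation" ::
        (preprocessing.filterMap (fun s =>
          let c := pvCatStr s
          if c ≠ "" then some (c ++ "_processing") else none))
    else [])
  ++ (if visualization ≠ [] then ["exploratory_analysis"] else [])
  ++ (if analysis.any (fun t => t ∈ pvModelingTechniques) then ["modeling"] else [])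
  ++ analysis

-- the one dedup pass: scan once, keeping a seen-set, emit each string at first occurrence
def pvDedupLoop (st : PySem.Set String × List String) : List String → List String
  | [] => st.2
  | x :: xs =>
      if x ∈ st.1 then pvDedupLoop st xs
      else pvDedupLoop (PySem.Set.add st.1 x, st.2 ++ [x]) xs

def determine_workflow_sequence_py_alt (preprocessing : List String) (analysis : List String) (visualization : List String) : List String :=
  pvDedupLoop (PySem.Set.empty, []) (pvRaw preprocessing analysis visualization)

-- ===== PRECONDITION & SPEC =====
def Spec_determine_workflow_sequence_py (preprocessing : List String) (analysis : List String) (visualization : List String) (out : List String) : Prop := out = determine_workflow_sequence_py_alt preprocessing analysis visualization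
instance (preprocessing : List String) (analysis : List String) (visualization : List String) (out : List String) : Decidable (Spec_determine_workflow_sequence_py preprocessing analysis visualization out) := by unfold Spec_determine_workflow_sequence_py; infer_instance

-- ===== CLAIM (what is proved, stated in full; the proofs are below) =====
def Claim_equal_determine_workflow_sequence_py : Prop := ∀ (preprocessing : List String) (analysis : List String) (visualization : List String), Dom_determine_workflow_sequence_py preprocessing analysis visualization → Spec_determine_workflow_sequence_py preprocessing analysis visualization (determine_workflow_sequence_py preprocessing analysis visualization)

-- ===== LEMMAS AND PROOFS =====

-- first-occurrence dedup relative to a seen-list (reference function for both sides)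
def pvDfr (seen : List String) : List String → List String
  | [] => []
  | x :: xs => if x ∈ seen then pvDfr seen xs else x :: pvDfr (x :: seen) xs

theorem pvDfr_congr (s t : List String) (xs : List String)
    (h : ∀ a, a ∈ s ↔ a ∈ t) : pvDfr s xs = pvDfr t xs := by
  induction xs generalizing s t with
  | nil => rfl
  | cons x xs ih =>
    simp only [pvDfr]
    by_cases hx : x ∈ s
    · rw [if_pos hx, if_pos ((h x).1 hx)]; exact ih s t h
    · rw [if_neg hx, if_neg (fun c => hx ((h x).2 c))]
      exact congrArg _ (ih (x :: s) (x :: t) (by intro a; simp [h a]))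

theorem pvDfr_sub (s xs : List String) (a : String) (h : a ∈ pvDfr s xs) : a ∈ xs := by
  induction xs generalizing s with
  | nil => simp [pvDfr] at h
  | cons x xs ih =>
    simp only [pvDfr] at h
    split at h
    · exact List.mem_cons_of_mem _ (ih _ h)
    · rcases List.mem_cons.1 h with rfl | h
      · exact List.mem_cons_self ..
      · exact List.mem_cons_of_mem _ (ih _ h)

-- splitting pvDfr across an append
theorem pvDfr_append (s xs ys : List String) :
    pvDfr s (xs ++ ys) = pvDfr s xs ++ pvDfr (pvDfr s xs ++ s) ys := by
  induction xs generalizing s with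
  | nil => simp [pvDfr]
  | cons x xs ih =>
    simp only [List.cons_append, pvDfr]
    by_cases hx : x ∈ s
    · rw [if_pos hx, if_pos hx, ih]
    · rw [if_neg hx, if_neg hx, ih]
      simp only [List.cons_append]
      refine congrArg _ (congrArg _ (pvDfr_congr _ _ _ ?_))
      intro a; simp; tauto

-- A's 'append if not in workflow' loop is acc ++ (dedup relative to acc)
theorem pvFoldlGuard_eq (xs acc : List String) :
    xs.foldl (fun w t => if t ∉ w then w ++ [t] else w) acc = acc ++ pvDfr acc xs := by
  induction xs generalizing acc with
  | nil => simp [pvDfr]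
  | cons x xs ih =>
    simp only [List.foldl_cons, pvDfr]
    by_cases hx : x ∈ acc
    · rw [if_neg (by simpa using hx), if_pos hx, ih]
    · rw [if_pos (by simpa using hx), if_neg hx, ih]
      rw [List.append_assoc]
      refine congrArg _ (congrArg _ (pvDfr_congr _ _ _ ?_))
      intro a; simp; tauto

-- A's category loop is the guard loop over the filterMap'd categories
theorem pvCatLoop_eq (xs acc : List String) :
    xs.foldl (fun w step =>
        if pvCatStr step ≠ "" ∧ (pvCatStr step ++ "_processing") ∉ w then w ++ [pvCatStr step ++ "_processing"] else w) acc
      = (xs.filterMap (fun s =>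
          if pvCatStr s ≠ "" then some (pvCatStr s ++ "_processing") else none)).foldl
          (fun w t => if t ∉ w then w ++ [t] else w) acc := by
  induction xs generalizing acc with
  | nil => rfl
  | cons x xs ih =>
    by_cases hc : pvCatStr x = ""
    · simp [hc, ih]
    · by_cases hm : (pvCatStr x ++ "_processing") ∈ acc
      · simp [hc, hm, ih]
      · simp [hc, hm, ih]

-- the break loop computes 'if any modeling technique occurs, append "modeling"'
theorem pvBreakLoop_eq (w : List String) (xs : List String) :
    pvBreakLoop w xs = w ++ (if xs.any (fun t => t ∈ pvModelingTechniques) then ["modeling"] else []) := by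
  induction xs with
  | nil => simp [pvBreakLoop]
  | cons x xs ih =>
    simp only [pvBreakLoop, List.any_cons]
    by_cases hx : x ∈ pvModelingTechniques
    · simp [hx]
    · simp [hx, ih]

-- B's dedup loop computes pvDfr (a PySem.Set String IS its list of distinct elements)
theorem pvDedupLoop_eq (xs : List String) (seen : PySem.Set String) (out : List String) :
    pvDedupLoop (seen, out) xs = out ++ pvDfr seen xs := by
  induction xs generalizing seen out with
  | nil => simp [pvDedupLoop, pvDfr]
  | cons x xs ih =>
    simp only [pvDedupLoop, pvDfr]
    by_cases hx : x ∈ seen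
    · rw [if_pos hx, if_pos hx, ih]
    · rw [if_neg hx, if_neg hx, ih]
      rw [List.append_assoc, List.singleton_append]
      refine congrArg _ (congrArg _ (pvDfr_congr _ _ _ ?_))
      intro a
      rw [PySem.Set.mem_add]
      simp [or_comm, eq_comm]

-- generated category strings collide with neither of the two needed fixed labels
theorem pvCat_ne_ea (c : String) : c ++ "_processing" ≠ "exploratory_analysis" := by
  intro h
  have h' : c.toList ++ "_processing".toList = "exploratory_analysis".toList := by
    rw [← String.toList_append, h]
  have hlen : c.toList.length = 9 := by
    have := congrArg List.length h'
    rw [List.length_append, (by decide : ("_processing".toList).length = 11),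
        (by decide : ("exploratory_analysis".toList).length = 20)] at this
    omega
  have hdrop := congrArg (List.drop c.toList.length) h'
  rw [List.drop_left, hlen] at hdrop
  exact absurd hdrop (by decide)

theorem pvCat_ne_mod (c : String) : c ++ "_processing" ≠ "modeling" := by
  intro h
  have h' : c.toList ++ "_processing".toList = "modeling".toList := by
    rw [← String.toList_append, h]
  have := congrArg List.length h'
  rw [List.length_append, (by decide : ("_processing".toList).length = 11),
      (by decide : ("modeling".toList).length = 8)] at this
  omega

-- every element of the filterMap'd category list is some c ++ "_processing"
theorem pvCats_shape (preprocessing : List String) (x : String)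
    (hx : x ∈ preprocessing.filterMap (fun s =>
        if pvCatStr s ≠ "" then some (pvCatStr s ++ "_processing") else none)) :
    ∃ c, x = c ++ "_processing" := by
  rw [List.mem_filterMap] at hx
  obtain ⟨s, _, hs⟩ := hx
  by_cases hc : pvCatStr s ≠ ""
  · rw [if_pos hc] at hs
    exact ⟨pvCatStr s, (Option.some.inj hs).symm⟩
  · rw [if_neg hc] at hs; cases hs

-- the dedup of the raw list P ++ V ++ M ++ xs, expanded piecewise
theorem pvMain (P V M xs : List String)
    (hEA : "exploratory_analysis" ∉ P)
    (hMODP : "modeling" ∉ P) (hMODV : "modeling" ∉ V)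
    (hV : V = [] ∨ V = ["exploratory_analysis"])
    (hM : M = [] ∨ M = ["modeling"]) :
    pvDfr [] (((P ++ V) ++ M) ++ xs)
      = ((pvDfr [] P ++ V) ++ M) ++ pvDfr ((pvDfr [] P ++ V) ++ M) xs := by
  have hsub : ∀ a, a ∈ pvDfr [] P → a ∈ P := fun a h => pvDfr_sub _ _ _ h
  rw [pvDfr_append, pvDfr_append, pvDfr_append]
  simp only [List.append_nil]
  have h1 : pvDfr (pvDfr [] P) V = V := by
    rcases hV with rfl | rfl
    · rfl
    · simp only [pvDfr]
      rw [if_neg (fun h => hEA (hsub _ h))]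
  rw [h1]
  have h2 : pvDfr (pvDfr [] P ++ V) M = M := by
    rcases hM with rfl | rfl
    · rfl
    · simp only [pvDfr]
      rw [if_neg]
      intro h
      rcases List.mem_append.1 h with h | h
      · exact hMODP (hsub _ h)
      · exact hMODV h
  rw [h2]

-- ===== VERDICT (by name: the statement is the Claim_ definition above) =====
theorem determine_workflow_sequence_py_spec : Claim_equal_determine_workflow_sequence_py := by
  intro preprocessing analysis visualization _
  unfold Spec_determine_workflow_sequence_py determine_workflow_sequence_py_alt
  simp only [determine_workflow_sequence_py, pvRaw, List.nil_append]
  rw [pvDedupLoop_eq]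
  simp only [List.nil_append]
  set cats := preprocessing.filterMap (fun s =>
      if pvCatStr s ≠ "" then some (pvCatStr s ++ "_processing") else none) with hcats
  set P : List String := if preprocessing ≠ [] then "data_preparation" :: cats else [] with hPdef
  set V : List String := if visualization ≠ [] then ["exploratory_analysis"] else [] with hVdef
  set M : List String := if analysis.any (fun t => t ∈ pvModelingTechniques) then ["modeling"] else [] with hMdef
  -- shape and membership facts
  have hPmem : ∀ x ∈ P, x = "data_preparation" ∨ ∃ c, x = c ++ "_processing" := by
    intro x hx
    rw [hPdef] at hx
    split at hx
    · rcases List.mem_cons.1 hx with rfl | hx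
      · exact Or.inl rfl
      · exact Or.inr (pvCats_shape preprocessing x hx)
    · cases hx
  have hEAnotP : "exploratory_analysis" ∉ P := by
    intro h
    rcases hPmem _ h with h | ⟨c, h⟩
    · exact absurd h (by decide)
    · exact pvCat_ne_ea c h.symm
  have hMODnotP : "modeling" ∉ P := by
    intro h
    rcases hPmem _ h with h | ⟨c, h⟩
    · exact absurd h (by decide)
    · exact pvCat_ne_mod c h.symm
  have hMODnotV : "modeling" ∉ V := by
    rw [hVdef]; split <;> simp
  have hVshape : V = [] ∨ V = ["exploratory_analysis"] := by
    rw [hVdef]; split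
    · exact Or.inr rfl
    · exact Or.inl rfl
  have hMshape : M = [] ∨ M = ["modeling"] := by
    rw [hMdef]; split
    · exact Or.inr rfl
    · exact Or.inl rfl
  -- A's first stage equals pvDfr [] P
  have hstage1 :
      (if preprocessing ≠ [] then
        preprocessing.foldl (fun w step =>
          if pvCatStr step ≠ "" ∧ (pvCatStr step ++ "_processing") ∉ w then w ++ [pvCatStr step ++ "_processing"] else w)
          ["data_preparation"]
      else ([] : List String)) = pvDfr [] P := by
    rw [hPdef]
    split
    · rw [pvCatLoop_eq, pvFoldlGuard_eq, ← hcats]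
      simp [pvDfr]
    · rfl
  rw [hstage1]
  -- A's visualization stage
  have hAvis : (if visualization ≠ [] then pvDfr [] P ++ ["exploratory_analysis"] else pvDfr [] P)
      = pvDfr [] P ++ V := by
    rw [hVdef]; split <;> simp
  rw [hAvis, pvBreakLoop_eq, ← hMdef, pvFoldlGuard_eq]
  -- the dead 'results_visualization' branch never fires
  rw [if_neg]
  · exact (pvMain P V M analysis hEAnotP hMODnotP hMODnotV hVshape hMshape).symm
  · rintro ⟨hv, hne⟩
    apply hne
    have : "exploratory_analysis" ∈ V := by rw [hVdef, if_pos hv]; exact List.mem_singleton.2 rfl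
    exact List.mem_append.2 (Or.inl (List.mem_append.2 (Or.inl (List.mem_append.2 (Or.inr this)))))
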